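-- pv_equiv track=rewrite | github.com/kivy/kivy | kivy/tools/pep8checker/pep8.py | missing_whitespace
-- ===== SOURCE A (Python) =====
-- WHITESPACE = frozenset(' \t')
--
-- def missing_whitespace(logical_line):
--     """
--     JCR: Each comma, semicolon or colon should be followed by whitespace.
--
--     Okay: [a, b]
--     Okay: (3,)
--     Okay: a[1:4]
--     Okay: a[:4]
--     Okay: a[1:]
--     Okay: a[1:4:2]
--     E231: ['a','b']
--     E231: foo(bar,baz)
--     """
--     line = logical_line
--     for index in range(len(line) - 1):
--         char = line[index]
--         if char in ',;:' and line[index + 1] not in WHITESPACE: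
--             before = line[:index]
--             if char == ':' and before.count('[') > before.count(']'):
--                 continue  # Slice syntax, no space required
--             if char == ',' and line[index + 1] == ')':
--                 continue  # Allow tuple with only one element: (3,)
--             yield index, "E231 missing whitespace after '%s'" % char
-- ===== SOURCE B (Python) =====
-- def missing_whitespace(logical_line):
--     """Single left-to-right pass keeping a running bracket depth instead of
--     recounting brackets in the prefix at every candidate character."""
--     result = []
--     n = len(logical_line)
--     depth = 0
--     for i, ch in enumerate(logical_line):
--         if (i + 1 < n and ch in ',;:'
--                 and logical_line[i + 1] not in ' \t'
--                 and not (ch == ':' and depth > 0)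
--                 and not (ch == ',' and logical_line[i + 1] == ')')):
--             result.append((i, "E231 missing whitespace after '%s'" % ch))
--         if ch == '[':
--             depth += 1
--         elif ch == ']':
--             depth -= 1
--     return result
-- ===== Notes on version B (the rewrite author's own statement) =====
-- stated objective: alternative
-- what changed: One pass that maintains a running bracket-depth counter (collecting results in a list), instead of slicing the prefix and recounting opening and closing brackets at every candidate character; avoids A's worst-case quadratic recounting but is not measurably faster on generic inputs.
import Mathlib
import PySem

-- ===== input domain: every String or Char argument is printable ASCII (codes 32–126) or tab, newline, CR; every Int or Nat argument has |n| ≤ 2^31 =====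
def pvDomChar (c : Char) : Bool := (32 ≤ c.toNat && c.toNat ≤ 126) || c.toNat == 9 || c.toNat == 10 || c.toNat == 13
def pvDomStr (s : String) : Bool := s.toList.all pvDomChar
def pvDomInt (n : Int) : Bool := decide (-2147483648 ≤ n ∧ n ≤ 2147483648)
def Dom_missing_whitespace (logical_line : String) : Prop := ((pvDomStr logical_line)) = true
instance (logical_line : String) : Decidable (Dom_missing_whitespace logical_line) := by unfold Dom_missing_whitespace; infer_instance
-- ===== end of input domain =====

-- B replaces A's per-match prefix slice-and-count by a single pass with a running bracket-depth counter (objective: alternative).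

-- ===== PORT A =====
def mwMsg (c : Char) : String := "E231 missing whitespace after '" ++ String.ofList [c] ++ "'"

def mwBodyA (line : List Char) (acc : List (Int × String)) (index : Int) : List (Int × String) :=
  let char := PySem.List.pyGetD line index ' '
  let nxt := PySem.List.pyGetD line (index + 1) ' '
  if (char = ',' ∨ char = ';' ∨ char = ':') ∧ ¬(nxt = ' ' ∨ nxt = '\t') then
    let before := PySem.List.slice line none (some index)
    if char = ':' ∧ before.count ']' < before.count '[' then acc
    else if char = ',' ∧ nxt = ')' then acc
    else acc ++ [(index, mwMsg char)]
  else acc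

def missing_whitespace (logical_line : String) : List (Int × String) :=
  let line := logical_line.toList
  (PySem.List.pyRange 0 ((line.length : Int) - 1) 1).foldl (mwBodyA line) []

-- ===== PORT B =====
def mwGo : List Char → Nat → Int → List (Int × String)
  | [], _, _ => []
  | [_], _, _ => []
  | c :: c2 :: rest, i, depth =>
      (if (c = ',' ∨ c = ';' ∨ c = ':') ∧ ¬(c2 = ' ' ∨ c2 = '\t')
          ∧ ¬(c = ':' ∧ 0 < depth) ∧ ¬(c = ',' ∧ c2 = ')')
       then [((i : Int), mwMsg c)] else [])
      ++ mwGo (c2 :: rest) (i + 1)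
           (if c = '[' then depth + 1 else if c = ']' then depth - 1 else depth)

def missing_whitespace_alt (logical_line : String) : List (Int × String) :=
  mwGo logical_line.toList 0 0

-- ===== PRECONDITION & SPEC =====
def Spec_missing_whitespace (logical_line : String) (out : List (Int × String)) : Prop := out = missing_whitespace_alt logical_line
instance (logical_line : String) (out : List (Int × String)) : Decidable (Spec_missing_whitespace logical_line out) := by unfold Spec_missing_whitespace; infer_instance

-- ===== CLAIM (what is proved, stated in full; the proofs are below) =====
def Claim_equal_missing_whitespace : Prop := ∀ (logical_line : String), Dom_missing_whitespace logical_line → Spec_missing_whitespace logical_line (missing_whitespace logical_line)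

-- ===== LEMMAS AND PROOFS =====

theorem mw_loop (line : List Char) : ∀ (k j : Nat) (acc : List (Int × String)),
    j ≤ line.length → line.length - j ≤ k →
    (PySem.List.pyRange (j : Int) ((line.length : Int) - 1) 1).foldl (mwBodyA line) acc
    = acc ++ mwGo (line.drop j) j
        (((line.take j).count '[' : Int) - ((line.take j).count ']' : Int)) := by
  intro k
  induction k with
  | zero =>
    intro j acc hj hk
    have hje : j = line.length := by omega
    subst hje
    rw [PySem.List.pyRange_one_eq_nil (by omega)]
    simp [mwGo]
  | succ k ih =>
    intro j acc hj hk
    by_cases hlt : j + 1 < line.length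
    · -- at least two chars remain
      have h2 : (line.drop j).length ≥ 2 := by simp [List.length_drop]; omega
      obtain ⟨c, c2, rest, h1⟩ : ∃ c c2 rest, line.drop j = c :: c2 :: rest := by
        rcases hd : line.drop j with _ | ⟨c, _ | ⟨c2, rest⟩⟩
        · rw [hd] at h2; simp at h2
        · rw [hd] at h2; simp at h2
        · exact ⟨c, c2, rest, rfl⟩
      have hcj : getElem? line j = some c := by
        have h0 : getElem? (line.drop j) 0 = some c := by rw [h1]; rfl
        rw [List.getElem?_drop] at h0
        simpa using h0
      have hcj1 : getElem? line (j + 1) = some c2 := by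
        have h0 : getElem? (line.drop j) 1 = some c2 := by rw [h1]; rfl
        rw [List.getElem?_drop] at h0
        simpa using h0
      have hdrop1 : line.drop (j + 1) = c2 :: rest := by
        have h' : line.drop (j + 1) = (line.drop j).drop 1 := by
          rw [List.drop_drop]
        rw [h', h1]; rfl
      have hcons : PySem.List.pyRange (j : Int) ((line.length : Int) - 1) 1
          = (j : Int) :: PySem.List.pyRange ((j : Int) + 1) ((line.length : Int) - 1) 1 :=
        PySem.List.pyRange_one_cons (by omega)
      rw [hcons, List.foldl_cons]
      have hcast : ((j : Int) + 1) = (((j + 1 : Nat)) : Int) := by push_cast; ring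
      rw [hcast, ih (j + 1) _ (by omega) (by omega), hdrop1]
      have hchar : PySem.List.pyGetD line ((j : Nat) : Int) ' ' = c := by
        rw [PySem.List.pyGetD_natCast, List.getD_eq_getElem?_getD, hcj]; rfl
      have hnxt : PySem.List.pyGetD line (((j : Nat) : Int) + 1) ' ' = c2 := by
        rw [hcast, PySem.List.pyGetD_natCast, List.getD_eq_getElem?_getD, hcj1]; rfl
      have hbefore : PySem.List.slice line none (some ((j : Nat) : Int)) = line.take j :=
        PySem.List.slice_to_natCast line j
      have htake : line.take (j + 1) = line.take j ++ [c] := by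
        rw [List.take_add_one, hcj]; rfl
      rw [h1, mwGo, htake]
      unfold mwBodyA
      rw [hchar, hnxt, hbefore]
      have hdep : (((line.take j ++ [c]).count '[' : Int) - ((line.take j ++ [c]).count ']' : Int))
          = (if c = '[' then ((line.take j).count '[' : Int) - ((line.take j).count ']' : Int) + 1
             else if c = ']' then ((line.take j).count '[' : Int) - ((line.take j).count ']' : Int) - 1
             else ((line.take j).count '[' : Int) - ((line.take j).count ']' : Int)) := by
        clear ih hcons
        by_cases hb1 : c = '[' <;> by_cases hb2 : c = ']' <;>
          simp [List.count_append, hb1, hb2] <;> omega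
      rw [hdep, ← List.append_assoc]
      congr 1
      by_cases hp : (c = ',' ∨ c = ';' ∨ c = ':') ∧ ¬(c2 = ' ' ∨ c2 = '\t')
      · rw [if_pos hp]
        by_cases hA : c = ':' ∧ (line.take j).count ']' < (line.take j).count '['
        · have h2A := hA.2
          rw [if_pos hA, if_neg (fun h => h.2.2.1 ⟨hA.1, by omega⟩), List.append_nil]
        · by_cases hB : c = ',' ∧ c2 = ')'
          · rw [if_neg hA, if_pos hB, if_neg (fun h => h.2.2.2 hB), List.append_nil]
          · have hA' : ¬(c = ':' ∧ 0 < ((line.take j).count '[' : Int) - ((line.take j).count ']' : Int)) := by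
              intro h
              have h2A := h.2
              exact hA ⟨h.1, by omega⟩
            rw [if_neg hA, if_neg hB, if_pos ⟨hp.1, hp.2, hA', hB⟩]
      · rw [if_neg hp, if_neg (fun h => hp ⟨h.1, h.2.1⟩), List.append_nil]
    · -- zero or one char remains: both sides are empty additions
      rw [PySem.List.pyRange_one_eq_nil (by omega)]
      have hlen : (line.drop j).length ≤ 1 := by simp [List.length_drop]; omega
      cases hd : line.drop j with
      | nil => simp [mwGo]
      | cons c t =>
        cases t with
        | nil => simp [mwGo]
        | cons c2 rest => rw [hd] at hlen; simp at hlen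

theorem missing_whitespace_spec : Claim_equal_missing_whitespace := by
  intro l _
  unfold Spec_missing_whitespace missing_whitespace missing_whitespace_alt
  have h := mw_loop l.toList l.toList.length 0 [] (Nat.zero_le _) (by omega)
  simpa using h
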